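-- pv_equiv track=rewrite | github.com/yutanagano/tidytcells | src/tidytcells/_utils/alignment.py | _get_max_score_from_matches
-- ===== SOURCE A (Python) =====
-- def _get_max_score_from_matches(matching_aas, max_mismatches, mismatch_penalty, gene):
--     matching_aas = matching_aas[::-1] if gene == "V" else matching_aas
--
--     if any(matching_aas):
--         # any mismatches at the beginning of the J or end of the V are considered random deletion, no penalty
--         matching_aas = matching_aas[matching_aas.index(True):]
--
--         while matching_aas.count(False) > max_mismatches:
--             matching_aas = matching_aas[matching_aas.index(False) + 1:]
--
--             if len(matching_aas) > 0 and any(matching_aas):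
--                 matching_aas = matching_aas[matching_aas.index(True):]
--             else:
--                 return -1
--
--         score = sum([1 if match == True else mismatch_penalty for match in matching_aas])
--
--         if score > 0:
--             return score
--
--     return -1
-- ===== SOURCE B (Python) =====
-- def _get_max_score_from_matches(matching_aas, max_mismatches, mismatch_penalty, gene):
--     # Count-based on a bytes view: the answer is the score of the leftmost
--     # match-starting suffix whose mismatch count fits the budget.  Check feasibility
--     # from the right (even the last match has too many mismatches after it), hop over
--     # exactly the mismatches that must be dropped with index(), then score the
--     # remaining suffix with counts -- no rescanning while loop.
--     seq = matching_aas[::-1] if gene == "V" else matching_aas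
--     s = bytes(seq)
--     try:
--         first = s.index(1)
--     except ValueError:
--         return -1
--     if len(s) - 1 - s.rindex(1) > max_mismatches:
--         return -1          # even the shortest match-starting suffix exceeds the budget
--     drop = s.count(0) - first - max_mismatches   # mismatches that must be dropped
--     pos = first
--     for _ in range(drop):
--         pos = s.index(0, pos) + 1
--     start = s.index(1, pos)
--     tail_len = len(s) - start
--     matches = s.count(1, start)
--     score = matches + (tail_len - matches) * mismatch_penalty
--     return score if score > 0 else -1
-- ===== Notes on version B (the rewrite author's own statement) =====
-- stated objective: faster
-- what changed: Replaces A's rescanning while loop (each iteration re-counts, re-indexes and re-slices the list) with closed-form counting on a bytes view: compute how many leading mismatches must be dropped, check feasibility from the right with rindex, hop over exactly that many mismatches with index(), and score the remaining suffix with count().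
-- outside the precondition, e.g. on _get_max_score_from_matches([True], -1, 1, 'J'): A raises ValueError, B returns -1
import Mathlib
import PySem

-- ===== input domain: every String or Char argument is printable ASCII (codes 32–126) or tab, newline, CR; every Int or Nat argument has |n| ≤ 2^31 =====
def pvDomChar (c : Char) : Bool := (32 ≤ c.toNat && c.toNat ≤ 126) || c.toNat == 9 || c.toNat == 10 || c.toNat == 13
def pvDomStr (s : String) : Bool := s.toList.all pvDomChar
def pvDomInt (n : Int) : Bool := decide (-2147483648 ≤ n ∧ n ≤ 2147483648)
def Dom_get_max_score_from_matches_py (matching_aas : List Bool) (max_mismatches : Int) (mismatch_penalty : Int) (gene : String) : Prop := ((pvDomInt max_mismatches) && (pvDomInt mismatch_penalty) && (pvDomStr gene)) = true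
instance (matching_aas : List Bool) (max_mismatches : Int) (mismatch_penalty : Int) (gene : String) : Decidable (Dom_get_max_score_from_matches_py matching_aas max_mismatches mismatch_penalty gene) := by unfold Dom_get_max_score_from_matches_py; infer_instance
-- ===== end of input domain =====

-- B replaces A's quadratic rescan-and-reslice while loop with counting plus index() hops over exactly the mismatches to drop (objective: faster).

-- ===== PORT A =====
-- the while loop of A, as structural recursion on the (shrinking) list
def pvLoopA (mm penalty : Int) (l : List Bool) : Int :=
  if ((l.count false : Int) > mm) then
    match h : PySem.List.index? l false with
    | none => -1      -- Python raises ValueError here; Pre_ excludes these inputs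
    | some i =>
      -- l[i+1:] with a nonnegative bound is List.drop (PySem.List.slice_from_natCast)
      let l2 := l.drop (i + 1)
      if 0 < l2.length ∧ l2.any id = true then
        match PySem.List.index? l2 true with
        | none => -1                              -- unreachable: l2.any id holds
        | some j => pvLoopA mm penalty (l2.drop j)  -- l2[j:]
      else -1
  else
    let score := (l.map (fun m => if m == true then (1 : Int) else penalty)).sum
    if score > 0 then score else -1
termination_by l.length
decreasing_by
  obtain ⟨hk, -⟩ := PySem.List.getElem_of_index?_eq_some h
  simp only [List.length_drop]
  omega

def get_max_score_from_matches_py (matching_aas : List Bool) (max_mismatches : Int) (mismatch_penalty : Int) (gene : String) : Int :=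
  -- matching_aas[::-1] is List.reverse (PySem.List.slice?_none_none_neg_one)
  let m1 := if gene == "V" then matching_aas.reverse else matching_aas
  if m1.any id = true then
    match PySem.List.index? m1 true with
    | none => -1                                  -- unreachable: m1.any id holds
    | some i => pvLoopA max_mismatches mismatch_penalty (m1.drop i)   -- m1[i:]
  else -1

-- ===== PORT B =====
-- the index()-hop loop of B: `for _ in range(k): pos = s.index(0, pos) + 1`
-- (s.index(0, pos) = pos + first index of false in seq[pos:]; exact for pos ≥ 0)
def pvWalk (seq : List Bool) : Nat → Nat → Nat
  | pos, 0 => pos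
  | pos, k + 1 =>
    match PySem.List.index? (seq.drop pos) false with
    | none => pos                       -- Python would raise; unreachable under B's guards
    | some i => pvWalk seq (pos + i + 1) k

def get_max_score_from_matches_py_alt (matching_aas : List Bool) (max_mismatches : Int) (mismatch_penalty : Int) (gene : String) : Int :=
  -- bytes(seq) is the same sequence viewed as 1/0 bytes; list ops below mirror the bytes ops
  let seq := if gene == "V" then matching_aas.reverse else matching_aas
  match PySem.List.index? seq true with
  | none => -1                          -- s.index(1) raised ValueError
  | some first =>
    -- len(s) - 1 - s.rindex(1) = index of the first 1 in the reversed sequence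
    match PySem.List.index? seq.reverse true with
    | none => -1                        -- unreachable: true ∈ seq
    | some r =>
      if (r : Int) > max_mismatches then -1
      else
        let drop : Int := (seq.count false : Int) - (first : Int) - max_mismatches
        -- `for _ in range(drop)`: empty for drop ≤ 0, exactly like `.toNat` clamping
        let pos := pvWalk seq first drop.toNat
        match PySem.List.index? (seq.drop pos) true with
        | none => -1                    -- s.index(1, pos); unreachable under B's guards
        | some j =>
          let start := pos + j
          let tail_len : Int := (seq.length : Int) - (start : Int)
          let hits : Int := ((seq.drop start).count true : Int)   -- `matches` in Source B
          let score := hits + (tail_len - hits) * mismatch_penalty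
          if score > 0 then score else -1

-- ===== PRECONDITION & SPEC =====
-- Pre_ excludes exactly the inputs on which A raises ValueError: max_mismatches < 0 while the
-- oriented list (reversed for gene "V") ends with True, where the while loop eventually calls
-- list.index(False) on an all-True list.
def Pre_get_max_score_from_matches_py (matching_aas : List Bool) (max_mismatches : Int) (mismatch_penalty : Int) (gene : String) : Prop :=
  0 ≤ max_mismatches ∨ (if gene == "V" then matching_aas.head? else matching_aas.getLast?) ≠ some true
instance (matching_aas : List Bool) (max_mismatches : Int) (mismatch_penalty : Int) (gene : String) : Decidable (Pre_get_max_score_from_matches_py matching_aas max_mismatches mismatch_penalty gene) := by unfold Pre_get_max_score_from_matches_py; infer_instance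

def pvWitness_get_max_score_from_matches_py : List Bool × Int × Int × String := ([true, false, true], 1, -1, "J")

def Spec_get_max_score_from_matches_py (matching_aas : List Bool) (max_mismatches : Int) (mismatch_penalty : Int) (gene : String) (out : Int) : Prop := out = get_max_score_from_matches_py_alt matching_aas max_mismatches mismatch_penalty gene
instance (matching_aas : List Bool) (max_mismatches : Int) (mismatch_penalty : Int) (gene : String) (out : Int) : Decidable (Spec_get_max_score_from_matches_py matching_aas max_mismatches mismatch_penalty gene out) := by unfold Spec_get_max_score_from_matches_py; infer_instance

-- ===== CLAIM (what is proved, stated in full; the proofs are below) =====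
def Claim_equal_get_max_score_from_matches_py : Prop := ∀ (matching_aas : List Bool) (max_mismatches : Int) (mismatch_penalty : Int) (gene : String), Dom_get_max_score_from_matches_py matching_aas max_mismatches mismatch_penalty gene → Pre_get_max_score_from_matches_py matching_aas max_mismatches mismatch_penalty gene → Spec_get_max_score_from_matches_py matching_aas max_mismatches mismatch_penalty gene (get_max_score_from_matches_py matching_aas max_mismatches mismatch_penalty gene)

-- ===== LEMMAS AND PROOFS =====

-- the leftmost True-starting suffix whose mismatch count is within budget, and its score
def pvBest (mm p : Int) : List Bool → Option Int
  | [] => none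
  | false :: rest => pvBest mm p rest
  | true :: rest =>
    if ((rest.count false : Int)) ≤ mm then
      some (((true :: rest).count true : Int) + ((rest.count false : Int)) * p)
    else pvBest mm p rest

lemma pvScoreSum (p : Int) (l : List Bool) :
    (l.map (fun m => if m == true then (1 : Int) else p)).sum =
      (l.count true : Int) + (l.count false : Int) * p := by
  induction l with
  | nil => simp
  | cons x l ih =>
    simp only [List.map_cons, List.sum_cons, ih]
    cases x <;> simp [List.count_cons] <;> push_cast <;> ring

lemma pvBest_trim (mm p : Int) (pre t : List Bool) (h : ∀ x ∈ pre, x = false) :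
    pvBest mm p (pre ++ t) = pvBest mm p t := by
  induction pre with
  | nil => rfl
  | cons x pre ih =>
    have hx := h x (by simp)
    subst hx
    simpa [pvBest] using ih (fun y hy => h y (by simp [hy]))

lemma pvBest_none (mm p : Int) (t : List Bool) (h : true ∉ t) : pvBest mm p t = none := by
  induction t with
  | nil => rfl
  | cons x t ih =>
    cases x
    · simpa [pvBest] using ih (fun hy => h (by simp [hy]))
    · exact absurd (by simp) h

lemma pvBest_cut (mm p : Int) (pre t : List Bool) (h : ∀ x ∈ pre, x = true)
    (hc : mm < ((pre ++ false :: t).count false : Int)) :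
    pvBest mm p (pre ++ false :: t) = pvBest mm p t := by
  induction pre with
  | nil => rfl
  | cons x pre ih =>
    have hx := h x (by simp)
    subst hx
    have hcount : ((pre ++ false :: t).count false : Int) = ((true :: pre ++ false :: t).count false : Int) := by
      simp [List.count_cons]
    rw [List.cons_append, pvBest, if_neg (by rw [hcount]; omega)]
    exact ih (fun y hy => h y (by simp [hy])) (by rw [hcount]; exact hc)

lemma pvAllTrue_getLast (l : List Bool) (hne : l ≠ []) (h : false ∉ l) :
    l.getLast? = some true := by
  obtain ⟨a, ha⟩ := Option.isSome_iff_exists.mp (List.getLast?_isSome.mpr hne)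
  have hmem : a ∈ l := List.mem_of_getLast? ha
  cases a
  · exact absurd hmem h
  · exact ha

lemma pvIndexTrue_decomp (l : List Bool) (i : Nat) (h : PySem.List.index? l true = some i) :
    ∃ pre suf, l = pre ++ true :: suf ∧ pre.length = i ∧ (∀ x ∈ pre, x = false) := by
  obtain ⟨pre, suf, hl, hlen, hnm⟩ := (PySem.List.index?_eq_some_iff _ _ _).mp h
  refine ⟨pre, suf, hl, hlen, fun x hx => ?_⟩
  cases x
  · rfl
  · exact absurd hx hnm

lemma pvIndexFalse_decomp (l : List Bool) (i : Nat) (h : PySem.List.index? l false = some i) :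
    ∃ pre suf, l = pre ++ false :: suf ∧ pre.length = i ∧ (∀ x ∈ pre, x = true) := by
  obtain ⟨pre, suf, hl, hlen, hnm⟩ := (PySem.List.index?_eq_some_iff _ _ _).mp h
  refine ⟨pre, suf, hl, hlen, fun x hx => ?_⟩
  cases x
  · exact absurd hx hnm
  · rfl

-- matches + mismatches = length
lemma pvCountTF (l : List Bool) : l.count true + l.count false = l.length := by
  induction l with
  | nil => rfl
  | cons x l ih => cases x <;> simp [List.count_cons] <;> omega

-- every match-starting suffix contains the mismatches after the last match
lemma pvBest_none_of_tail (mm p : Int) : ∀ (u w : List Bool), (∀ x ∈ w, x = false) →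
    mm < (w.length : Int) → pvBest mm p (u ++ true :: w) = none := by
  intro u
  induction u with
  | nil =>
    intro w hw hmm
    have hcw : w.count false = w.length := by
      rw [List.count_eq_length]
      exact fun b hb => ((hw b hb).symm ▸ rfl)
    rw [List.nil_append, pvBest, if_neg (by rw [hcw]; omega)]
    exact pvBest_none mm p w (fun ht => by simpa using hw true ht)
  | cons x u ih =>
    intro w hw hmm
    have hrest := ih w hw hmm
    cases x
    · simpa [pvBest] using hrest
    · rw [List.cons_append, pvBest,
        if_neg (by
          have : w.count false ≤ (u ++ true :: w).count false := by
            simp [List.count_append, List.count_cons]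
          have hcw : w.count false = w.length := by
            rw [List.count_eq_length]
            exact fun b hb => ((hw b hb).symm ▸ rfl)
          omega)]
      exact hrest

-- the walk, expressed on the suffix list itself
def pvWalkL : Nat → List Bool → List Bool
  | 0, l => l
  | k + 1, l =>
    match PySem.List.index? l false with
    | none => l
    | some i => pvWalkL k (l.drop (i + 1))

lemma pvWalk_drop (seq : List Bool) : ∀ (k pos : Nat),
    seq.drop (pvWalk seq pos k) = pvWalkL k (seq.drop pos) := by
  intro k
  induction k with
  | zero => intro pos; rfl
  | succ k ih =>
    intro pos
    cases h : PySem.List.index? (seq.drop pos) false with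
    | none => simp only [pvWalk, pvWalkL, h]
    | some i =>
      simp only [pvWalk, pvWalkL, h]
      rw [ih (pos + i + 1), List.drop_drop, Nat.add_assoc]

-- after the walk, the first match starts the leftmost suffix within budget
lemma pvWalk_best (mm p : Int) (hmm : 0 ≤ mm) : ∀ (k : Nat) (l : List Bool),
    (l.count false : Int) ≤ mm + k → (0 < k → (l.count false : Int) = mm + k) →
    (match PySem.List.index? (pvWalkL k l) true with
     | none => pvBest mm p l = none
     | some j => pvBest mm p l =
         some ((((pvWalkL k l).drop j).count true : Int) +
               (((pvWalkL k l).drop j).count false : Int) * p)) := by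
  intro k
  induction k with
  | zero =>
    intro l hle _
    simp only [pvWalkL]
    cases hidx : PySem.List.index? l true with
    | none => exact pvBest_none mm p l ((PySem.List.index?_eq_none_iff _ _).mp hidx)
    | some j =>
      dsimp only
      obtain ⟨pre2, suf2, hdec2, hlen2, hall2⟩ := pvIndexTrue_decomp _ _ hidx
      have hdropj : l.drop j = true :: suf2 := by
        rw [hdec2, ← hlen2, List.drop_left]
      have hcpre2 : pre2.count false = pre2.length := by
        rw [List.count_eq_length]
        exact fun b hb => ((hall2 b hb).symm ▸ rfl)
      have hcl2 : l.count false = pre2.length + (true :: suf2).count false := by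
        rw [hdec2]; simp [List.count_append, hcpre2]
      rw [hdropj]
      conv_lhs => rw [hdec2]
      rw [pvBest_trim mm p pre2 (true :: suf2) hall2, pvBest,
        if_pos (by
          have hs : (true :: suf2).count false = suf2.count false := by simp
          push_cast at hle
          omega)]
      have hs : (true :: suf2).count false = suf2.count false := by simp
      rw [hs]
  | succ k ih =>
    intro l hle heq
    have heq' : (l.count false : Int) = mm + k + 1 := by
      have := heq (Nat.succ_pos k)
      push_cast at this ⊢
      omega
    have hpos : 0 < l.count false := by omega
    have hidx : ∃ i, PySem.List.index? l false = some i := by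
      cases h : PySem.List.index? l false with
      | none =>
        have := (PySem.List.index?_eq_none_iff _ _).mp h
        rw [List.count_eq_zero_of_not_mem this] at hpos
        omega
      | some i => exact ⟨i, rfl⟩
    obtain ⟨i, hi⟩ := hidx
    simp only [pvWalkL, hi]
    obtain ⟨pre, suf, hdec, hleni, hall⟩ := pvIndexFalse_decomp _ _ hi
    have hdropi : l.drop (i + 1) = suf := by
      rw [hdec, show pre ++ false :: suf = (pre ++ [false]) ++ suf by simp,
        List.drop_left' (by simp [hleni])]
    have hcpre : pre.count false = 0 := by
      rw [List.count_eq_zero]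
      intro hmem
      exact absurd (hall false hmem) (by simp)
    have hcl : l.count false = suf.count false + 1 := by
      rw [hdec]; simp [List.count_append, List.count_cons, hcpre]
    have hcut : pvBest mm p l = pvBest mm p suf := by
      conv_lhs => rw [hdec]
      exact pvBest_cut mm p pre suf hall (by rw [← hdec]; omega)
    have hkey := ih suf (by push_cast; omega) (fun _ => by push_cast; omega)
    rw [hdropi, hcut]
    exact hkey

-- B's body equals the pvBest form of the oriented list, with no precondition
lemma pvAltTop (mas : List Bool) (mm p : Int) (gene : String) (seq : List Bool)
    (hseq : (if gene == "V" then mas.reverse else mas) = seq) :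
    get_max_score_from_matches_py_alt mas mm p gene =
    (match pvBest mm p seq with
     | none => -1
     | some s => if s ≤ 0 then -1 else s) := by
  unfold get_max_score_from_matches_py_alt
  dsimp only
  rw [hseq]
  cases hf : PySem.List.index? seq true with
  | none =>
    rw [pvBest_none mm p seq ((PySem.List.index?_eq_none_iff _ _).mp hf)]
  | some first =>
    dsimp only
    cases hr : PySem.List.index? seq.reverse true with
    | none =>
      obtain ⟨hk, hget, -⟩ := PySem.List.getElem_of_index?_eq_some hf
      have : true ∈ seq := hget ▸ List.getElem_mem hk
      exact absurd (List.mem_reverse.mpr this)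
        ((PySem.List.index?_eq_none_iff _ _).mp hr)
    | some r =>
      dsimp only
      obtain ⟨w, z, hdecr, hlenr, hallr⟩ := pvIndexTrue_decomp _ _ hr
      have hdecseq : seq = z.reverse ++ true :: w.reverse := by
        have := congrArg List.reverse hdecr
        simpa using this
      have hwrev : ∀ x ∈ w.reverse, x = false := fun x hx => hallr x (List.mem_reverse.mp hx)
      by_cases hfeas : (r : Int) > mm
      · rw [if_pos hfeas]
        rw [show pvBest mm p seq = none from by
          rw [hdecseq]
          exact pvBest_none_of_tail mm p z.reverse w.reverse hwrev
            (by rw [List.length_reverse, hlenr]; omega)]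
      · rw [if_neg hfeas]
        obtain ⟨pre, suf, hdecf, hlenf, hallf⟩ := pvIndexTrue_decomp _ _ hf
        have hdropf : seq.drop first = true :: suf := by
          rw [hdecf, ← hlenf, List.drop_left]
        have hcpre : pre.count false = pre.length := by
          rw [List.count_eq_length]
          exact fun b hb => ((hallf b hb).symm ▸ rfl)
        have hcseq : seq.count false = first + (seq.drop first).count false := by
          conv_lhs => rw [hdecf]
          rw [hdropf]
          simp [List.count_append, hcpre, hlenf]
        have hbtrim : pvBest mm p seq = pvBest mm p (seq.drop first) := by
          rw [hdropf]
          conv_lhs => rw [hdecf]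
          exact pvBest_trim mm p pre (true :: suf) hallf
        have hmm0 : 0 ≤ mm := le_trans (Int.natCast_nonneg r) (not_lt.mp hfeas)
        set k : Nat := ((seq.count false : Int) - (first : Int) - mm).toNat with hk
        have hkle : ((seq.drop first).count false : Int) ≤ mm + k := by
          rw [hk]
          have : ((seq.drop first).count false : Int) = (seq.count false : Int) - first := by
            rw [hcseq]; push_cast; ring
          omega
        have hkeq : 0 < k → ((seq.drop first).count false : Int) = mm + k := by
          intro hkpos
          rw [hk]
          have : ((seq.drop first).count false : Int) = (seq.count false : Int) - first := by
            rw [hcseq]; push_cast; ring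
          rw [hk] at hkpos
          omega
        have hkey := pvWalk_best mm p hmm0 k (seq.drop first) hkle hkeq
        rw [← pvWalk_drop seq k first] at hkey
        cases hj : PySem.List.index? (seq.drop (pvWalk seq first k)) true with
        | none =>
          rw [hj] at hkey
          dsimp only at hkey ⊢
          rw [hbtrim, hkey]
        | some j =>
          rw [hj] at hkey
          dsimp only at hkey ⊢
          obtain ⟨hjlt, -, -⟩ := PySem.List.getElem_of_index?_eq_some hj
          have hdd : (List.drop (pvWalk seq first k) seq).drop j
              = List.drop (pvWalk seq first k + j) seq := by
            rw [List.drop_drop, Nat.add_comm]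
          rw [hdd] at hkey
          rw [hbtrim, hkey]
          dsimp only
          have hlentail : (((seq.drop (pvWalk seq first k + j))).length : Int)
              = (seq.length : Int) - ((pvWalk seq first k + j : Nat) : Int) := by
            rw [List.length_drop]
            rw [List.length_drop] at hjlt
            push_cast
            omega
          have hTF := pvCountTF (seq.drop (pvWalk seq first k + j))
          have hfc : ((seq.length : Int) - ((pvWalk seq first k + j : Nat) : Int))
                - ((seq.drop (pvWalk seq first k + j)).count true : Int)
              = ((seq.drop (pvWalk seq first k + j)).count false : Int) := by
            rw [← hlentail]; push_cast; omega
          rw [hfc]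
          split_ifs <;> first | rfl | omega

lemma pvLoopA_eq (mm p : Int) : ∀ (n : Nat) (l : List Bool), l.length ≤ n → l.head? = some true →
    (0 ≤ mm ∨ l.getLast? ≠ some true) →
    pvLoopA mm p l =
      (match pvBest mm p l with
       | none => -1
       | some s => if s ≤ 0 then -1 else s) := by
  intro n
  induction n with
  | zero =>
    intro l hlen hh _
    rw [List.length_eq_zero_iff.mp (Nat.le_zero.mp hlen)] at hh
    simp at hh
  | succ n ih =>
    intro l hlen hh hpre
    obtain ⟨rest, rfl⟩ : ∃ rest, l = true :: rest := by
      cases l with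
      | nil => simp at hh
      | cons x rest =>
        cases x
        · simp at hh
        · exact ⟨rest, rfl⟩
    rw [pvLoopA]
    by_cases hc : (((true :: rest).count false : Int) > mm)
    · rw [if_pos hc]
      split
      next hidx =>
        have hfn : false ∉ (true :: rest) := (PySem.List.index?_eq_none_iff _ _).mp hidx
        have hc0 : (true :: rest).count false = 0 := List.count_eq_zero.mpr hfn
        have hlast := pvAllTrue_getLast (true :: rest) (by simp) hfn
        rcases hpre with h0 | hl
        · omega
        · exact absurd hlast hl
      next i hidx =>
        obtain ⟨pre, suf, hdec, hlenpre, hall⟩ := pvIndexFalse_decomp _ _ hidx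
        have hdrop : (true :: rest).drop (i + 1) = suf := by
          rw [hdec, show pre ++ false :: suf = (pre ++ [false]) ++ suf by simp,
            List.drop_left' (by simp [hlenpre])]
        have hbest : pvBest mm p (true :: rest) = pvBest mm p suf := by
          rw [hdec]
          exact pvBest_cut mm p pre suf hall (by rw [← hdec]; omega)
        simp only [hdrop]
        by_cases hb : (0 < suf.length ∧ suf.any id = true)
        · rw [if_pos hb]
          have htm : true ∈ suf := by
            obtain ⟨x, hx, hid⟩ := List.any_eq_true.mp hb.2
            cases x
            · simp at hid
            · exact hx
          split
          next hidx2 => exact absurd htm ((PySem.List.index?_eq_none_iff _ _).mp hidx2)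
          next j hidx2 =>
            obtain ⟨pre2, suf2, hdec2, hlenpre2, hall2⟩ := pvIndexTrue_decomp _ _ hidx2
            have hdrop2 : suf.drop j = true :: suf2 := by
              rw [hdec2, ← hlenpre2, List.drop_left]
            rw [hdrop2]
            have hlens : (true :: suf2).length ≤ n := by
              have h1 := congrArg List.length hdec
              have h2 := congrArg List.length hdec2
              simp only [List.length_cons, List.length_append] at h1 h2 hlen ⊢
              omega
            have hlast2 : (true :: suf2).getLast? = (true :: rest).getLast? := by
              rw [hdec, hdec2, show pre ++ false :: (pre2 ++ true :: suf2)
                    = (pre ++ false :: pre2) ++ (true :: suf2) by simp,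
                List.getLast?_append_of_ne_nil _ (by simp)]
            rw [ih (true :: suf2) hlens rfl
                  (hpre.elim Or.inl (fun hl => Or.inr (by rw [hlast2]; exact hl))),
              hbest, hdec2, pvBest_trim mm p pre2 (true :: suf2) hall2]
        · rw [if_neg hb]
          have hns : true ∉ suf := by
            intro htm
            exact hb ⟨List.length_pos_of_mem htm, List.any_eq_true.mpr ⟨true, htm, rfl⟩⟩
          rw [hbest, pvBest_none mm p suf hns]
    · rw [if_neg hc]
      have hcr : (rest.count false : Int) = ((true :: rest).count false : Int) := by
        simp [List.count_cons]
      have hbest : pvBest mm p (true :: rest)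
          = some (((true :: rest).count true : Int) + ((rest.count false : Int)) * p) := by
        rw [pvBest, if_pos (by omega)]
      have hcc : (((true :: rest).count false : Int)) = ((rest.count false : Int)) := by
        simp [List.count_cons]
      rw [hbest]
      simp only [pvScoreSum, hcc]
      split_ifs <;> first | rfl | omega

theorem get_max_score_from_matches_py_spec : Claim_equal_get_max_score_from_matches_py := by
  intro mas mm p g _ hpre
  unfold Spec_get_max_score_from_matches_py
  have hpre' : 0 ≤ mm ∨ (if g == "V" then mas.reverse else mas).getLast? ≠ some true := by
    unfold Pre_get_max_score_from_matches_py at hpre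
    rcases hpre with h0 | hl
    · exact Or.inl h0
    · refine Or.inr ?_
      by_cases hg : g == "V" <;> simp [hg, List.getLast?_reverse] at hl ⊢ <;> exact hl
  rw [pvAltTop mas mm p g (if g == "V" then mas.reverse else mas) rfl]
  unfold get_max_score_from_matches_py
  dsimp only
  set m1 := if g == "V" then mas.reverse else mas with hm1
  by_cases ha : m1.any id = true
  · rw [if_pos ha]
    have htm : true ∈ m1 := by
      obtain ⟨x, hx, hid⟩ := List.any_eq_true.mp ha
      cases x
      · simp at hid
      · exact hx
    cases hidx : PySem.List.index? m1 true with
    | none => exact absurd htm ((PySem.List.index?_eq_none_iff _ _).mp hidx)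
    | some i =>
      dsimp only
      obtain ⟨pre, suf, hdec, hlenpre, hall⟩ := pvIndexTrue_decomp _ _ hidx
      have hdrop : m1.drop i = true :: suf := by
        rw [hdec, ← hlenpre, List.drop_left]
      rw [hdrop]
      have hlast : (true :: suf).getLast? = m1.getLast? := by
        rw [hdec, List.getLast?_append_of_ne_nil _ (by simp)]
      rw [pvLoopA_eq mm p (true :: suf).length (true :: suf) le_rfl rfl
            (hpre'.elim Or.inl (fun hl => Or.inr (by rw [hlast]; exact hl)))]
      congr 1
      rw [hdec]
      exact (pvBest_trim mm p pre (true :: suf) hall).symm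
  · rw [if_neg ha]
    have hns : true ∉ m1 := fun htm => ha (List.any_eq_true.mpr ⟨true, htm, rfl⟩)
    rw [pvBest_none mm p m1 hns]
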